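-- pv_equiv track=rewrite | github.com/tothmarci08/sudoku | sudoku.py | melyik_negyzet
-- ===== SOURCE A (Python) =====
-- table = [[5,3,0,0,7,0,0,0,0],
--          [6,0,0,1,9,5,0,0,0],
--          [0,9,8,0,0,0,0,6,0],
--          [8,0,0,0,6,0,0,0,3],
--          [4,0,0,8,0,3,0,0,1],
--          [7,0,0,0,2,0,0,0,6],
--          [0,6,0,0,0,0,2,8,0],
--          [0,0,0,0,1,9,0,0,5],
--          [0,0,0,0,8,0,0,7,9]]
--
-- def melyik_negyzet(sor,o):
--     negyzet1 = []
--     negyzet2 = []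
--     negyzet3 = []
--     negyzet4 = []
--     negyzet5 = []
--     negyzet6 = []
--     negyzet7 = []
--     negyzet8 = []
--     negyzet9 = []
--     for i in range(0,9):
--         for j in range(0,9):
--             if i < 3 and j < 3:
--                 negyzet1.append(table[i][j])
--             elif i < 3 and j < 6:
--                 negyzet2.append(table[i][j])
--             elif i < 3 and j < 9:
--                 negyzet3.append(table[i][j])
--             elif i < 6 and j < 3:
--                 negyzet4.append(table[i][j])
--             elif i < 6 and j < 6:
--                 negyzet5.append(table[i][j])
--             elif i < 6 and j < 9:
--                 negyzet6.append(table[i][j])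
--             elif i < 9 and j < 3:
--                 negyzet7.append(table[i][j])
--             elif i < 9 and j < 6:
--                 negyzet8.append(table[i][j])
--             else:
--                 negyzet9.append(table[i][j])
--     if sor < 3 and o < 3:
--         return negyzet1
--     elif sor < 3 and o < 6:
--         return negyzet2
--     elif sor < 3 and o < 9:
--         return negyzet3
--     elif sor < 6 and o < 3:
--         return negyzet4
--     elif sor < 6 and o < 6:
--         return negyzet5
--     elif sor < 6 and o < 9:
--         return negyzet6
--     elif sor < 9 and o < 3:
--         return negyzet7
--     elif sor < 9 and o < 6:
--         return negyzet8
--     elif sor < 9 and o < 9: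
--         return negyzet9
-- ===== SOURCE B (Python) =====
-- table = [[5,3,0,0,7,0,0,0,0],
--          [6,0,0,1,9,5,0,0,0],
--          [0,9,8,0,0,0,0,6,0],
--          [8,0,0,0,6,0,0,0,3],
--          [4,0,0,8,0,3,0,0,1],
--          [7,0,0,0,2,0,0,0,6],
--          [0,6,0,0,0,0,2,8,0],
--          [0,0,0,0,1,9,0,0,5],
--          [0,0,0,0,8,0,0,7,9]]
--
-- def _block(rb, cb):
--     """The 3x3 block (rb, cb) of the table, in row-major order."""
--     return [table[i][j] for i in range(rb * 3, rb * 3 + 3)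
--                         for j in range(cb * 3, cb * 3 + 3)]
--
-- def melyik_negyzet(sor, o):
--     if sor >= 9 or o >= 9:
--         return None
--     rb = 0 if sor < 3 else (1 if sor < 6 else 2)
--     cb = 0 if o < 3 else (1 if o < 6 else 2)
--     return _block(rb, cb)
-- ===== Notes on version B (the rewrite author's own statement) =====
-- stated objective: simpler
-- what changed: B computes the block indices from the same threshold cascade and directly lists the nine cells of the one relevant 3x3 block, instead of scanning all 81 cells into nine accumulator lists and then selecting one.
-- outside the precondition, e.g. on melyik_negyzet(9, 0): A returns None, B returns None; on melyik_negyzet(0, 9): A returns None, B returns None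
import Mathlib
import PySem

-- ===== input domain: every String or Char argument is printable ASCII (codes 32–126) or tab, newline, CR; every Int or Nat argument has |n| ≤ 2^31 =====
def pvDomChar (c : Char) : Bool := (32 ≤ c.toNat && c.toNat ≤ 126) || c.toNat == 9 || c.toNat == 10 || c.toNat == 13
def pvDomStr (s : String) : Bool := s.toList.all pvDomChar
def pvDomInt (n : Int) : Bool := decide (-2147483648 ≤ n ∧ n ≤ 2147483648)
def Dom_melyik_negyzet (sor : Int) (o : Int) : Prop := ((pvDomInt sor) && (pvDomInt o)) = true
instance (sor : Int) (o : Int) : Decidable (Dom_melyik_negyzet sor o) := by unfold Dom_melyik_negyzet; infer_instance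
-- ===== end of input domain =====

-- B replaces A's 81-cell scan into nine accumulator lists by computing the block
-- indices and directly listing the nine cells of the one relevant block (objective: simpler).

-- the module-level sudoku table
def pvTable : List (List Int) :=
  [[5,3,0,0,7,0,0,0,0],
   [6,0,0,1,9,5,0,0,0],
   [0,9,8,0,0,0,0,6,0],
   [8,0,0,0,6,0,0,0,3],
   [4,0,0,8,0,3,0,0,1],
   [7,0,0,0,2,0,0,0,6],
   [0,6,0,0,0,0,2,8,0],
   [0,0,0,0,1,9,0,0,5],
   [0,0,0,0,8,0,0,7,9]]

-- table[i][j]; both indices are always in 0..8 here, so pyGet? is always some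
def pvTget (i j : Int) : Int :=
  (PySem.List.pyGet? ((PySem.List.pyGet? pvTable i).getD []) j).getD 0

-- ===== PORT A =====
-- state of A's loop: the nine accumulator lists negyzet1 … negyzet9
structure PvSq where
  n1 : List Int
  n2 : List Int
  n3 : List Int
  n4 : List Int
  n5 : List Int
  n6 : List Int
  n7 : List Int
  n8 : List Int
  n9 : List Int
  deriving Repr, DecidableEq

-- the nested for-loops of A (independent of sor and o, as in the Python)
def pvNegyzets : PvSq :=
  (PySem.List.pyRange 0 9 1).foldl (fun st i =>
    (PySem.List.pyRange 0 9 1).foldl (fun (st : PvSq) j =>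
      if i < 3 ∧ j < 3 then { st with n1 := st.n1 ++ [pvTget i j] }
      else if i < 3 ∧ j < 6 then { st with n2 := st.n2 ++ [pvTget i j] }
      else if i < 3 ∧ j < 9 then { st with n3 := st.n3 ++ [pvTget i j] }
      else if i < 6 ∧ j < 3 then { st with n4 := st.n4 ++ [pvTget i j] }
      else if i < 6 ∧ j < 6 then { st with n5 := st.n5 ++ [pvTget i j] }
      else if i < 6 ∧ j < 9 then { st with n6 := st.n6 ++ [pvTget i j] }
      else if i < 9 ∧ j < 3 then { st with n7 := st.n7 ++ [pvTget i j] }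
      else if i < 9 ∧ j < 6 then { st with n8 := st.n8 ++ [pvTget i j] }
      else { st with n9 := st.n9 ++ [pvTget i j] }) st)
    ⟨[], [], [], [], [], [], [], [], []⟩

def melyik_negyzet (sor : Int) (o : Int) : List Int :=
  if sor < 3 ∧ o < 3 then pvNegyzets.n1
  else if sor < 3 ∧ o < 6 then pvNegyzets.n2
  else if sor < 3 ∧ o < 9 then pvNegyzets.n3
  else if sor < 6 ∧ o < 3 then pvNegyzets.n4
  else if sor < 6 ∧ o < 6 then pvNegyzets.n5
  else if sor < 6 ∧ o < 9 then pvNegyzets.n6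
  else if sor < 9 ∧ o < 3 then pvNegyzets.n7
  else if sor < 9 ∧ o < 6 then pvNegyzets.n8
  else if sor < 9 ∧ o < 9 then pvNegyzets.n9
  else []  -- Python falls off the cascade and returns None here; excluded by Pre_

-- ===== PORT B =====
-- the 3x3 block (rb, cb) of the table, row-major (helper _block of Source B)
def pvBlock (rb cb : Int) : List Int :=
  (PySem.List.pyRange (rb * 3) (rb * 3 + 3) 1).flatMap (fun i =>
    (PySem.List.pyRange (cb * 3) (cb * 3 + 3) 1).map (fun j => pvTget i j))

def melyik_negyzet_alt (sor : Int) (o : Int) : List Int :=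
  if 9 ≤ sor ∨ 9 ≤ o then []  -- Python B returns None here; excluded by Pre_
  else
    pvBlock (if sor < 3 then 0 else if sor < 6 then 1 else 2)
            (if o < 3 then 0 else if o < 6 then 1 else 2)

-- ===== PRECONDITION & SPEC =====
-- Pre_ excludes sor ≥ 9 or o ≥ 9, where A falls off its cascade and returns None, not a list.
def Pre_melyik_negyzet (sor : Int) (o : Int) : Prop := sor < 9 ∧ o < 9
instance (sor : Int) (o : Int) : Decidable (Pre_melyik_negyzet sor o) := by unfold Pre_melyik_negyzet; infer_instance
def pvWitness_melyik_negyzet : Int × Int := (4, 4)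

def Spec_melyik_negyzet (sor : Int) (o : Int) (out : List Int) : Prop := out = melyik_negyzet_alt sor o
instance (sor : Int) (o : Int) (out : List Int) : Decidable (Spec_melyik_negyzet sor o out) := by unfold Spec_melyik_negyzet; infer_instance

-- ===== CLAIM (what is proved, stated in full; the proofs are below) =====
def Claim_equal_melyik_negyzet : Prop := ∀ (sor : Int) (o : Int), Dom_melyik_negyzet sor o → Pre_melyik_negyzet sor o → Spec_melyik_negyzet sor o (melyik_negyzet sor o)

-- ===== LEMMAS AND PROOFS =====

-- ===== VERDICT (by name: the statement is the Claim_ definition above) =====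
theorem melyik_negyzet_spec : Claim_equal_melyik_negyzet := by
  intro sor o _ hpre
  obtain ⟨h9, h9'⟩ := hpre
  unfold Spec_melyik_negyzet melyik_negyzet melyik_negyzet_alt
  split_ifs <;> first | decide | omega
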